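-- pv_equiv track=rewrite | github.com/varungaddalay-github/daily-engineering-workout | problems/2025_12_17.py | detect_api_abuse_optimized
-- ===== SOURCE A (Python) =====
-- def detect_api_abuse_optimized(logs):
--     # external sort + stream - So no dict with event_ts lists
--     res = set()
--
--     logs.sort(key=lambda x: (x[0], x[1]))
--
--     curr_usr = None
--     window = []
--
--     for usr, ts in logs:
--         if usr != curr_usr:
--             curr_usr = usr
--             window = [ts]
--         else:
--             window.append(ts)
--
--             while window and ts - window[0] > 60:
--                 window.pop(0)
--
--             if len(window) > 3:
--                 res.add(usr)
--                 window = []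
--
--     return res
-- ===== SOURCE B (Python) =====
-- def detect_api_abuse_optimized(logs):
--     # Group-then-scan: sort in place (same mutation as A), cut the sorted list
--     # into per-user runs, and flag a user when any four consecutive timestamps
--     # of its run span at most 60 seconds.
--     logs.sort(key=lambda x: (x[0], x[1]))
--     res = set()
--     i, n = 0, len(logs)
--     while i < n:
--         usr = logs[i][0]
--         j = i
--         while j < n and logs[j][0] == usr:
--             j += 1
--         times = [ts for _, ts in logs[i:j]]
--         if any(b - a <= 60 for a, b in zip(times, times[3:])):
--             res.add(usr)
--         i = j
--     return res
-- ===== Notes on version B (the rewrite author's own statement) =====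
-- stated objective: alternative
-- what changed: A's single interleaved stream over the sorted list (per-user window with reset-on-hit) is replaced by a group-then-scan decomposition: cut the sorted list into per-user runs and test each run's timestamps with a closed any(times[i+3]-times[i] <= 60) sliding check.
import Mathlib
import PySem

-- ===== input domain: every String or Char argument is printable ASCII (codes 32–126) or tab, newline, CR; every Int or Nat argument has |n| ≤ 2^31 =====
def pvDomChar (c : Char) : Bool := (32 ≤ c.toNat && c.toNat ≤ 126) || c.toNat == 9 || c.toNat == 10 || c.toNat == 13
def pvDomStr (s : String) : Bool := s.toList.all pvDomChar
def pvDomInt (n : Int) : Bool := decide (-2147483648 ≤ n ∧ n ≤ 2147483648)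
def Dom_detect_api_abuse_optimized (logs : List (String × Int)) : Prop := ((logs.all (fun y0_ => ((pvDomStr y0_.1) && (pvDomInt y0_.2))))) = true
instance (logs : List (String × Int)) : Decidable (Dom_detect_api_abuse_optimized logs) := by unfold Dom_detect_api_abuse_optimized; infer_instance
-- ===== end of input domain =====

-- B replaces A's single sorted stream with window-resets by a group-then-scan
-- decomposition (per-user runs + a closed 4-consecutive-within-60s check); same
-- return value; both A and B sort `logs` in place (the equivalence is about the return value).


-- ===== PORT A =====
-- one iteration of A's for-loop; state = (res, curr_usr, window)
def stepA : (List String × Option String × List Int) → (String × Int) →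
    List String × Option String × List Int
  | (res, curr, window), p =>
    if some p.1 ≠ curr then
      (res, some p.1, [p.2])
    else
      -- window.append(ts); while window and ts - window[0] > 60: window.pop(0)
      -- (the popped window, Python's local `window`, is written out twice)
      if ((window ++ [p.2]).dropWhile (fun t => decide (p.2 - t > 60))).length > 3 then
        (PySem.Set.add res p.1, some p.1, [])
      else (res, some p.1, (window ++ [p.2]).dropWhile (fun t => decide (p.2 - t > 60)))

def detect_api_abuse_optimized (logs : List (String × Int)) : List String :=
  ((PySem.List.sorted2 logs (fun x => x.1) (fun x => x.2)).foldl stepA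
    (([] : List String), (none : Option String), ([] : List Int))).1

-- ===== PORT B =====
-- any(b - a <= 60 for a, b in zip(times, times[3:]))
def abuseRun (times : List Int) : Bool :=
  (times.zip (times.drop 3)).any (fun p => decide (p.2 - p.1 ≤ 60))

-- the outer while-loop of B: peel one per-user run per iteration
def altGo : List (String × Int) → List String → List String
  | [], res => res
  | (u, t) :: rest, res =>
      let run := rest.takeWhile (fun p => p.1 == u)
      let rest' := rest.dropWhile (fun p => p.1 == u)
      altGo rest' (if abuseRun (t :: run.map Prod.snd) then PySem.Set.add res u else res)
termination_by l _ => l.length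
decreasing_by
  have := List.length_dropWhile_le (fun p => p.1 == u) rest
  simpa using Nat.lt_succ_of_le this

def detect_api_abuse_optimized_alt (logs : List (String × Int)) : List String :=
  altGo (PySem.List.sorted2 logs (fun x => x.1) (fun x => x.2)) []

-- ===== PRECONDITION & SPEC =====
def Spec_detect_api_abuse_optimized (logs : List (String × Int)) (out : List String) : Prop := out = detect_api_abuse_optimized_alt logs
instance (logs : List (String × Int)) (out : List String) : Decidable (Spec_detect_api_abuse_optimized logs out) := by unfold Spec_detect_api_abuse_optimized; infer_instance

-- ===== CLAIM (what is proved, stated in full; the proofs are below) =====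
def Claim_equal_detect_api_abuse_optimized : Prop := ∀ (logs : List (String × Int)), Dom_detect_api_abuse_optimized logs → Spec_detect_api_abuse_optimized logs (detect_api_abuse_optimized logs)

-- ===== LEMMAS AND PROOFS =====

-- the lexicographic order the sort key (x[0], x[1]) establishes
def lexLE (a b : String × Int) : Prop := a.1 < b.1 ∨ (a.1 = b.1 ∧ a.2 ≤ b.2)

-- the Bool comparator sorted2 uses internally for this key
def beforeLex (a b : String × Int) : Bool :=
  decide (a.1 < b.1) || (!decide (b.1 < a.1) && decide (a.2 < b.2))

theorem beforeLex_iff (a b : String × Int) :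
    beforeLex a b = true ↔ (a.1 < b.1 ∨ (a.1 = b.1 ∧ a.2 < b.2)) := by
  simp only [beforeLex, Bool.or_eq_true, Bool.and_eq_true, Bool.not_eq_true',
    decide_eq_true_eq, decide_eq_false_iff_not]
  constructor
  · rintro (h | ⟨h1, h2⟩)
    · exact Or.inl h
    · rcases lt_trichotomy a.1 b.1 with h' | h' | h'
      · exact Or.inl h'
      · exact Or.inr ⟨h', h2⟩
      · exact absurd h' h1
  · rintro (h | ⟨h1, h2⟩)
    · exact Or.inl h
    · exact Or.inr ⟨by rw [h1]; exact lt_irrefl _, h2⟩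

theorem beforeLex_asymm (a b : String × Int) (h : beforeLex a b = true) :
    beforeLex b a = false := by
  rw [beforeLex_iff] at h
  rw [Bool.eq_false_iff]
  intro hb
  rw [beforeLex_iff] at hb
  rcases h with h | ⟨h1, h2⟩ <;> rcases hb with hb | ⟨hb1, hb2⟩
  · exact absurd hb (not_lt_of_gt h)
  · exact absurd h (by rw [hb1]; exact lt_irrefl _)
  · exact absurd hb (by rw [h1]; exact lt_irrefl _)
  · exact absurd hb2 (not_lt_of_gt h2)

theorem beforeLex_trans (a b c : String × Int) (h1 : beforeLex a b = true)
    (h2 : beforeLex b c = true) : beforeLex a c = true := by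
  rw [beforeLex_iff] at h1 h2 ⊢
  rcases h1 with h1 | ⟨h1, h1'⟩ <;> rcases h2 with h2 | ⟨h2, h2'⟩
  · exact Or.inl (lt_trans h1 h2)
  · exact Or.inl (by rw [← h2]; exact h1)
  · exact Or.inl (by rw [h1]; exact h2)
  · exact Or.inr ⟨h1.trans h2, lt_trans h1' h2'⟩

theorem pairwise_insertBy {α : Type} (before : α → α → Bool)
    (hasym : ∀ a b, before a b = true → before b a = false)
    (htrans : ∀ a b c, before a b = true → before b c = true → before a c = true)
    (x : α) (l : List α) (hl : l.Pairwise (fun a b => before b a = false)) :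
    (PySem.List.insertBy before x l).Pairwise (fun a b => before b a = false) := by
  induction l with
  | nil => simp [PySem.List.insertBy]
  | cons y ys ih =>
    rw [List.pairwise_cons] at hl
    by_cases h : before x y = true
    · rw [PySem.List.insertBy, if_pos h]
      refine List.Pairwise.cons ?_ (List.Pairwise.cons hl.1 hl.2)
      intro z hz
      rcases List.mem_cons.mp hz with rfl | hz'
      · exact hasym _ _ h
      · rw [Bool.eq_false_iff]
        intro hzx
        have := htrans _ _ _ hzx h
        rw [hl.1 z hz'] at this
        exact Bool.false_ne_true this
    · rw [PySem.List.insertBy, if_neg h]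
      refine List.Pairwise.cons ?_ (ih hl.2)
      intro z hz
      rcases (PySem.List.mem_insertBy before x z ys).mp hz with rfl | hz'
      · exact Bool.eq_false_iff.mpr h
      · exact hl.1 z hz'

theorem pairwise_foldl_insertBy {α : Type} (before : α → α → Bool)
    (hasym : ∀ a b, before a b = true → before b a = false)
    (htrans : ∀ a b c, before a b = true → before b c = true → before a c = true)
    (xs : List α) :
    ∀ l, l.Pairwise (fun a b => before b a = false) →
      (xs.foldl (fun acc x => PySem.List.insertBy before x acc) l).Pairwise
        (fun a b => before b a = false) := by
  induction xs with
  | nil => intro l hl; exact hl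
  | cons x xs ih =>
    intro l hl
    exact ih _ (pairwise_insertBy before hasym htrans x l hl)

theorem sorted2_pairwise_lexLE (logs : List (String × Int)) :
    (PySem.List.sorted2 logs (fun x => x.1) (fun x => x.2)).Pairwise lexLE := by
  have heq : PySem.List.sorted2 logs (fun x => x.1) (fun x => x.2)
      = logs.foldl (fun acc x => PySem.List.insertBy beforeLex x acc) [] := rfl
  rw [heq]
  have hpw := pairwise_foldl_insertBy beforeLex beforeLex_asymm beforeLex_trans logs []
    List.Pairwise.nil
  refine hpw.imp_of_mem ?_
  intro a b _ _ h
  rw [Bool.eq_false_iff] at h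
  rcases lt_trichotomy a.1 b.1 with h' | h' | h'
  · exact Or.inl h'
  · refine Or.inr ⟨h', ?_⟩
    by_contra hab
    exact h ((beforeLex_iff b a).mpr (Or.inr ⟨h'.symm, lt_of_not_ge hab⟩))
  · exact absurd ((beforeLex_iff b a).mpr (Or.inl h')) h

-- the 4-in-60s condition as an index statement
theorem abuseRun_iff (l : List Int) :
    abuseRun l = true ↔ ∃ i : Nat, ∃ _h : i + 3 < l.length, l[i + 3] - l[i] ≤ 60 := by
  unfold abuseRun
  rw [List.any_eq_true]
  constructor
  · rintro ⟨p, hp, hle⟩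
    rcases List.mem_iff_getElem.mp hp with ⟨i, hi, hpi⟩
    have hlen : i < l.length - 3 := by
      have := hi; rw [List.length_zip, List.length_drop] at this; omega
    have hi3 : i + 3 < l.length := by omega
    refine ⟨i, hi3, ?_⟩
    have hp' : p = (l[i]'(by omega), l[i + 3]'hi3) := by
      rw [← hpi, List.getElem_zip]
      congr 1
      rw [List.getElem_drop]
      congr 1
      omega
    rw [hp'] at hle
    simpa using hle
  · rintro ⟨i, hi3, hle⟩
    have hzl : i < (l.zip (l.drop 3)).length := by
      rw [List.length_zip, List.length_drop]; omega
    refine ⟨(l.zip (l.drop 3))[i], List.getElem_mem _, ?_⟩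
    rw [List.getElem_zip]
    have hdr : (l.drop 3)[i]'(by rw [List.length_drop]; omega) = l[i + 3]'hi3 := by
      rw [List.getElem_drop]; congr 1; omega
    simpa [hdr] using hle

-- dropping a prefix of events each more than 60s before t cannot lose a 4-window,
-- provided t sits at position ≤ 3 of the whole list
theorem abuseRun_drop_prefix (d m : List Int) (t : Int) (k : Nat)
    (hpw : (d ++ m).Pairwise (· ≤ ·))
    (hd : ∀ x ∈ d, t - x > 60)
    (hk3 : k ≤ 3) (hk : k < (d ++ m).length)
    (ht : (d ++ m)[k] = t) :
    abuseRun (d ++ m) = abuseRun m := by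
  have hdk : d.length ≤ k := by
    by_contra hlt
    push_neg at hlt
    have hgl : (d ++ m)[k] = d[k]'hlt := List.getElem_append_left hlt
    have htd : t ∈ d := by rw [← ht, hgl]; exact List.getElem_mem _
    have := hd t htd
    omega
  have hmono := List.pairwise_iff_getElem.mp hpw
  rw [Bool.eq_iff_iff, abuseRun_iff, abuseRun_iff]
  constructor
  · rintro ⟨i, hi, hle⟩
    by_cases hid : i < d.length
    · exfalso
      have hxi : (d ++ m)[i]'(by omega) = d[i]'hid := List.getElem_append_left hid
      have hxd : t - d[i]'hid > 60 := hd _ (List.getElem_mem _)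
      have htle : t ≤ (d ++ m)[i + 3]'hi := by
        rcases Nat.lt_or_ge k (i + 3) with hlt | hge
        · rw [← ht]; exact hmono k (i + 3) hk hi hlt
        · have hke : k = i + 3 := by omega
          subst hke
          rw [← ht]
      rw [hxi] at hle
      omega
    · push_neg at hid
      have him : i - d.length + 3 < m.length := by
        have := hi; rw [List.length_append] at this; omega
      refine ⟨i - d.length, him, ?_⟩
      have h1 : (d ++ m)[i]'(by omega) = m[i - d.length]'(by omega) :=
        List.getElem_append_right hid
      have h2 : (d ++ m)[i + 3]'hi = m[i + 3 - d.length]'(by omega) :=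
        List.getElem_append_right (by omega)
      rw [h1, h2] at hle
      have h3 : i + 3 - d.length = i - d.length + 3 := by omega
      simp only [h3] at hle
      exact hle
  · rintro ⟨i, hi, hle⟩
    have hfl : d.length + i + 3 < (d ++ m).length := by
      rw [List.length_append]; omega
    refine ⟨d.length + i, hfl, ?_⟩
    have h1 : (d ++ m)[d.length + i]'(by omega) = m[i]'(by omega) := by
      rw [List.getElem_append_right (by omega)]
      congr 1
      omega
    have h2 : (d ++ m)[d.length + i + 3]'hfl = m[i + 3]'hi := by
      rw [List.getElem_append_right (by omega)]
      congr 1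
      omega
    rw [h1, h2]
    exact hle

-- A's inner per-user window recursion, tracking only whether it ever fires
def innerA : List Int → List Int → Bool
  | _, [] => false
  | w, t :: r =>
      if ((w ++ [t]).dropWhile (fun x => decide (t - x > 60))).length > 3 then true
      else innerA ((w ++ [t]).dropWhile (fun x => decide (t - x > 60))) r

theorem innerA_nil (w : List Int) : innerA w [] = false := rfl

theorem innerA_cons (w : List Int) (t : Int) (r : List Int) :
    innerA w (t :: r)
      = if ((w ++ [t]).dropWhile (fun x => decide (t - x > 60))).length > 3 then true
        else innerA ((w ++ [t]).dropWhile (fun x => decide (t - x > 60))) r := rfl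

theorem innerA_eq (r : List Int) : ∀ w : List Int,
    (w ++ r).Pairwise (· ≤ ·) → w.length ≤ 3 → innerA w r = abuseRun (w ++ r) := by
  induction r with
  | nil =>
    intro w _ hw3
    rw [innerA_nil, eq_comm, Bool.eq_false_iff]
    intro habs
    rcases (abuseRun_iff _).mp habs with ⟨i, hi, _⟩
    simp only [List.append_nil] at hi
    omega
  | cons t r' ih =>
    intro w hpw hw3
    rw [innerA_cons]
    set w1 := w ++ [t] with hw1
    set w2 := w1.dropWhile (fun x => decide (t - x > 60)) with hw2def
    set d := w1.takeWhile (fun x => decide (t - x > 60)) with hddef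
    have hdw2 : d ++ w2 = w1 := List.takeWhile_append_dropWhile
    have hfull : w ++ t :: r' = w1 ++ r' := by simp [hw1]
    have hw1len : w1.length = w.length + 1 := by simp [hw1]
    have hw2len : w2.length ≤ w1.length := List.length_dropWhile_le _ _
    have hdmem : ∀ x ∈ d, t - x > 60 := by
      intro x hx
      have := List.mem_takeWhile_imp hx
      simpa using this
    have hpfull : (w1 ++ r').Pairwise (· ≤ ·) := hfull ▸ hpw
    by_cases hfire : w2.length > 3
    · rw [if_pos hfire]
      have hwlen3 : w.length = 3 := by
        have := congrArg List.length hdw2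
        simp only [List.length_append] at this
        omega
      have hd0 : d.length = 0 := by
        have := congrArg List.length hdw2
        simp only [List.length_append] at this
        omega
      have hdnil : d = [] := List.length_eq_zero_iff.mp hd0
      have hw0 : 0 < w.length := by omega
      have htake : w1.takeWhile (fun x => decide (t - x > 60)) = [] := by
        rw [← hddef]; exact hdnil
      have hhead := List.takeWhile_eq_nil_iff.mp htake (by omega)
      have hget : w1.get ⟨0, by omega⟩ = w[0]'hw0 := by
        simp only [List.get_eq_getElem, hw1]
        exact List.getElem_append_left hw0
      rw [hget] at hhead
      simp only [decide_eq_true_eq, not_lt] at hhead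
      rw [eq_comm, abuseRun_iff]
      have hlen : 0 + 3 < (w ++ t :: r').length := by
        simp [List.length_append, hwlen3]
      refine ⟨0, hlen, ?_⟩
      have h3 : (w ++ t :: r')[0 + 3]'hlen = t := by
        rw [List.getElem_append_right (by omega)]
        simp [hwlen3]
      have h0 : (w ++ t :: r')[0]'(by omega) = w[0]'hw0 := List.getElem_append_left hw0
      rw [h3, h0]
      omega
    · rw [if_neg hfire]
      have hsub : (w2 ++ r').Sublist (w1 ++ r') :=
        List.Sublist.append_right (List.dropWhile_sublist _) r'
      have hrec := ih w2 (List.Pairwise.sublist hsub hpfull) (by omega)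
      rw [hrec, hfull]
      have hsplit : w1 ++ r' = d ++ (w2 ++ r') := by rw [← List.append_assoc, hdw2]
      rw [hsplit]
      have hklen : w.length < (d ++ (w2 ++ r')).length := by
        rw [← hsplit, List.length_append, hw1len]; omega
      have ht : (d ++ (w2 ++ r'))[w.length]'hklen = t := by
        have hlist : (d ++ (w2 ++ r')) = w ++ t :: r' := by rw [← hsplit, ← hfull]
        simp only [hlist]
        rw [List.getElem_append_right (le_refl _)]
        simp
      exact (abuseRun_drop_prefix d (w2 ++ r') t w.length
        (by rw [← hsplit]; exact hpfull) hdmem hw3 hklen ht).symm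

-- once u is in res, its remaining run cannot change res, and curr_usr stays u
theorem foldA_run_mem (u : String) : ∀ (run : List (String × Int)),
    (∀ p ∈ run, p.1 = u) → ∀ (res : List String) (w : List Int), u ∈ res →
    (run.foldl stepA (res, some u, w)).1 = res ∧
    (run.foldl stepA (res, some u, w)).2.1 = some u := by
  intro run
  induction run with
  | nil => intro _ res w _; exact ⟨rfl, rfl⟩
  | cons p r ih =>
    intro hu res w hres
    have hp1 : p.1 = u := hu p List.mem_cons_self
    have hcond : ¬ (some p.1 ≠ some u) := by simp [hp1]
    simp only [List.foldl_cons]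
    rw [stepA, if_neg hcond]
    by_cases hfire :
        ((w ++ [p.2]).dropWhile (fun x => decide (p.2 - x > 60))).length > 3
    · simp only [if_pos hfire]
      have hadd : PySem.Set.add res p.1 = res := by
        rw [hp1]; exact PySem.Set.add_of_mem hres
      rw [hadd, hp1]
      exact ih (fun q hq => hu q (List.mem_cons_of_mem _ hq)) res [] hres
    · simp only [if_neg hfire]
      rw [hp1]
      exact ih (fun q hq => hu q (List.mem_cons_of_mem _ hq)) res _ hres

-- effect of one whole run of user u on A's state
theorem foldA_run (u : String) : ∀ (run : List (String × Int)),
    (∀ p ∈ run, p.1 = u) → ∀ (res : List String) (w : List Int),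
    (run.foldl stepA (res, some u, w)).1
      = (if innerA w (run.map Prod.snd) then PySem.Set.add res u else res) ∧
    (run.foldl stepA (res, some u, w)).2.1 = some u := by
  intro run
  induction run with
  | nil =>
    intro _ res w
    refine ⟨?_, rfl⟩
    simp [innerA_nil]
  | cons p r ih =>
    intro hu res w
    have hp1 : p.1 = u := hu p List.mem_cons_self
    have hcond : ¬ (some p.1 ≠ some u) := by simp [hp1]
    simp only [List.foldl_cons, List.map_cons]
    rw [stepA, if_neg hcond]
    simp only [innerA_cons]
    by_cases hfire :
        ((w ++ [p.2]).dropWhile (fun x => decide (p.2 - x > 60))).length > 3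
    · simp only [if_pos hfire, if_true]
      have hmem : u ∈ PySem.Set.add res p.1 := by
        rw [hp1]; exact (PySem.Set.mem_add _ _ _).mpr (Or.inr rfl)
      have hrest := foldA_run_mem u r (fun q hq => hu q (List.mem_cons_of_mem _ hq))
        (PySem.Set.add res p.1) [] hmem
      rw [hp1] at hrest ⊢
      exact hrest
    · simp only [if_neg hfire]
      rw [hp1]
      exact ih (fun q hq => hu q (List.mem_cons_of_mem _ hq)) res _

-- after dropping the u-run, no later entry belongs to u
theorem ne_of_mem_dropWhile (u : String) : ∀ (rest : List (String × Int)),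
    rest.Pairwise lexLE → (∀ p ∈ rest, u ≤ p.1) →
    ∀ p ∈ rest.dropWhile (fun p => p.1 == u), p.1 ≠ u := by
  intro rest
  induction rest with
  | nil => intro _ _ p hp; simp at hp
  | cons h tl ih =>
    intro hpw hle
    by_cases hh : (h.1 == u) = true
    · rw [List.dropWhile_cons, if_pos hh]
      exact ih (List.pairwise_cons.mp hpw).2 (fun q hq => hle q (List.mem_cons_of_mem _ hq))
    · rw [List.dropWhile_cons, if_neg hh]
      intro p hp
      have hne : h.1 ≠ u := by simpa using hh
      have hu_lt : u < h.1 := lt_of_le_of_ne (hle h List.mem_cons_self) (Ne.symm hne)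
      rcases List.mem_cons.mp hp with rfl | hp'
      · exact hne
      · rcases (List.pairwise_cons.mp hpw).1 p hp' with hlt | ⟨heq, _⟩
        · exact ne_of_gt (lt_trans hu_lt hlt)
        · rw [← heq]; exact hne

-- the main decomposition: A's stream over a lex-sorted list equals B's run-by-run scan
theorem foldA_eq_altGo : ∀ (n : Nat) (L : List (String × Int)), L.length ≤ n →
    L.Pairwise lexLE → ∀ (res : List String) (curr : Option String) (w : List Int),
    (∀ p ∈ L, some p.1 ≠ curr) →
    (L.foldl stepA (res, curr, w)).1 = altGo L res := by
  intro n
  induction n with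
  | zero =>
    intro L hlen _ res curr w _
    have hnil : L = [] := List.length_eq_zero_iff.mp (Nat.le_zero.mp hlen)
    subst hnil
    simp only [List.foldl_nil, altGo]
  | succ n ih =>
    intro L hlen hpw res curr w hcur
    match L with
    | [] => simp only [List.foldl_nil, altGo]
    | (u, t) :: rest =>
      have hcond : some ((u, t) : String × Int).1 ≠ curr := hcur _ List.mem_cons_self
      simp only [List.foldl_cons]
      rw [stepA, if_pos hcond]
      rw [altGo]
      set run := rest.takeWhile (fun p => p.1 == u) with hrundef
      set rest' := rest.dropWhile (fun p => p.1 == u) with hrestdef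
      have hsplitrest : run ++ rest' = rest := List.takeWhile_append_dropWhile
      have hukeys : ∀ p ∈ run, p.1 = u := by
        intro p hp
        have := List.mem_takeWhile_imp hp
        simpa using this
      have hpwrest : rest.Pairwise lexLE := (List.pairwise_cons.mp hpw).2
      have hheadle : ∀ p ∈ rest, u ≤ p.1 := by
        intro p hp
        rcases (List.pairwise_cons.mp hpw).1 p hp with hlt | ⟨heq, _⟩
        · exact le_of_lt hlt
        · exact le_of_eq heq
      have hrest'ne : ∀ p ∈ rest', p.1 ≠ u := ne_of_mem_dropWhile u rest hpwrest hheadle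
      have hpwrest' : rest'.Pairwise lexLE :=
        List.Pairwise.sublist (List.dropWhile_sublist _) hpwrest
      have hpwrun : ((u, t) :: run).Pairwise lexLE := by
        refine List.Pairwise.sublist ?_ hpw
        exact List.cons_sublist_cons.mpr (List.takeWhile_sublist _)
      have hts : (t :: run.map Prod.snd).Pairwise (· ≤ ·) := by
        have hmap : (((u, t) :: run).map Prod.snd).Pairwise
            (fun a b => a ≤ b) := by
          rw [List.pairwise_map]
          refine hpwrun.imp_of_mem ?_
          intro a b ha hb hab
          have ha1 : a.1 = u := by
            rcases List.mem_cons.mp ha with rfl | h'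
            · rfl
            · exact hukeys a h'
          have hb1 : b.1 = u := by
            rcases List.mem_cons.mp hb with rfl | h'
            · rfl
            · exact hukeys b h'
          rcases hab with hlt | ⟨_, hle⟩
          · rw [ha1, hb1] at hlt; exact absurd hlt (lt_irrefl _)
          · exact hle
        simpa using hmap
      have hrun := foldA_run u run hukeys res [t]
      have hstate : run.foldl stepA (res, some u, [t])
          = ((run.foldl stepA (res, some u, [t])).1, some u,
             (run.foldl stepA (res, some u, [t])).2.2) := by
        exact Prod.ext rfl (Prod.ext hrun.2 rfl)
      have hinner : innerA [t] (run.map Prod.snd) = abuseRun (t :: run.map Prod.snd) :=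
        innerA_eq (run.map Prod.snd) [t] (by simpa using hts) (by simp)
      rw [← hsplitrest, List.foldl_append]
      rw [hstate]
      have hlen' : rest'.length ≤ n := by
        have h1 : rest'.length ≤ rest.length := List.length_dropWhile_le _ _
        have h2 : rest.length + 1 ≤ n + 1 := by simpa using hlen
        omega
      rw [ih rest' hlen' hpwrest' _ (some u) _
        (fun p hp => by simpa using (hrest'ne p hp))]
      congr 1
      rw [hrun.1, hinner]

-- ===== VERDICT (by name: the statement is the Claim_ definition above) =====
theorem detect_api_abuse_optimized_spec : Claim_equal_detect_api_abuse_optimized := by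
  intro logs _
  unfold Spec_detect_api_abuse_optimized
  unfold detect_api_abuse_optimized detect_api_abuse_optimized_alt
  exact foldA_eq_altGo _ _ (le_refl _) (sorted2_pairwise_lexLE logs) [] none []
    (fun p _ => by simp)
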